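-- pv_equiv track=rewrite | github.com/AlexandreMorinvil/inf8775 | TP2_v2/solution_tp2.py | do_prefix_path
-- ===== SOURCE A (Python) =====
-- def do_prefix_path(tree, index):
--     if len(tree) == 0:
--         return []
--     else:
--         path = [index]
--         if index in tree:
--             for child_index in tree[index]:
--                 path += do_prefix_path(tree, child_index)
--                 path += [index]
--
--         return path
-- ===== SOURCE B (Python) =====
-- _DONE = object()
--
-- def do_prefix_path(tree, index):
--     if len(tree) == 0:
--         return []
--     path = [index]
--     stack = [(index, iter(tree.get(index, ())))]
--     while stack:
--         child = next(stack[-1][1], _DONE)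
--         if child is _DONE:
--             stack.pop()
--             if stack:
--                 path.append(stack[-1][0])
--         else:
--             path.append(child)
--             stack.append((child, iter(tree.get(child, ()))))
--     return path
-- ===== Notes on version B (the rewrite author's own statement) =====
-- stated objective: alternative
-- what changed: Replaced A's recursive Euler-tour construction (child lists concatenated up through every ancestor) by an iterative loop over an explicit stack of (node, child-iterator) frames that appends each visited node to one output list.
import Mathlib
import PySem

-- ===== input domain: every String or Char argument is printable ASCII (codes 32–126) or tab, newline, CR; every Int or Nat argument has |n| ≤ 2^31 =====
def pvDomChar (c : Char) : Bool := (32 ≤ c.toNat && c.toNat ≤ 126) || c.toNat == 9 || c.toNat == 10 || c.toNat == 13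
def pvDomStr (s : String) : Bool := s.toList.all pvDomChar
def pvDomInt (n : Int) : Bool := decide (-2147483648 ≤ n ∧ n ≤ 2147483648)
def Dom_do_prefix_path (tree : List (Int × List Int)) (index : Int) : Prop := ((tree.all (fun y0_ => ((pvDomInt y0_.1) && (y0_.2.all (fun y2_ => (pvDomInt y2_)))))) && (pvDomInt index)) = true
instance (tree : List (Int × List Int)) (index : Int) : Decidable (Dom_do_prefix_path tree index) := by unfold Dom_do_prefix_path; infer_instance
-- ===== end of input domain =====

-- B replaces A's recursion by an iterative explicit-stack traversal; equivalence is proved on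
-- inputs where A's recursion terminates (no cycle reachable from index).

-- child list of a node: tree[n] if n in tree (first match, Python dict), else []
def pvChildren (tree : List (Int × List Int)) (n : Int) : List Int :=
  ((PySem.Dict.mk tree).get? n).getD []

-- ===== PORT A =====
-- A's recursion, fuel = recursion depth; under Pre_ the depth is ≤ tree.length + 1, so the
-- top-level fuel tree.length + 1 is never exhausted (the 0-case is unreachable).
def pvAcore (tree : List (Int × List Int)) : Nat → Int → List Int
  | 0, _ => []
  | f + 1, index =>
    if tree.length = 0 then []
    else
      match (PySem.Dict.mk tree).get? index with
      | none => [index]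
      | some cs => cs.foldl (fun path c => (path ++ pvAcore tree f c) ++ [index]) [index]

def do_prefix_path (tree : List (Int × List Int)) (index : Int) : List Int :=
  pvAcore tree (tree.length + 1) index

-- ===== PORT B =====
-- `stack[-1][0]` appended after a pop, when the stack is still nonempty
def pvHeadApp : List (Int × List Int) → List Int
  | [] => []
  | (p, _) :: _ => [p]

-- B's while-loop; each iteration consumes one fuel (the bound below is exact, so fuel never runs out under Pre_)
def pvRun (tree : List (Int × List Int)) : Nat → List (Int × List Int) → List Int → List Int
  | _, [], path => path
  | 0, _ :: _, path => path
  | f + 1, (_, []) :: stk, path => pvRun tree f stk (path ++ pvHeadApp stk)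
  | f + 1, (n, c :: cs) :: stk, path =>
      pvRun tree f ((c, pvChildren tree c) :: (n, cs) :: stk) (path ++ [c])

-- exact number of loop iterations spent on a frame whose remaining children are cs (depth bound f)
def pvNeeded (tree : List (Int × List Int)) : Nat → List Int → Nat
  | 0, _ => 1
  | f + 1, cs => (cs.map (fun c => 1 + pvNeeded tree f (pvChildren tree c))).sum + 1

def do_prefix_path_alt (tree : List (Int × List Int)) (index : Int) : List Int :=
  if tree.length = 0 then []
  else
    pvRun tree (pvNeeded tree tree.length (pvChildren tree index))
      [(index, pvChildren tree index)] [index]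

-- ===== PRECONDITION & SPEC =====
-- `pvHasWalk tree f n = true` iff some walk of exactly f child-steps starts at n.
def pvHasWalk (tree : List (Int × List Int)) : Nat → Int → Bool
  | 0, _ => true
  | f + 1, n => (pvChildren tree n).any (pvHasWalk tree f)

-- Pre_ excludes exactly the inputs on which Python A never returns (RecursionError): by pigeonhole
-- a walk of tree.length + 1 steps from index revisits a key, i.e. a cycle is reachable from index.
def Pre_do_prefix_path (tree : List (Int × List Int)) (index : Int) : Prop :=
  pvHasWalk tree (tree.length + 1) index = false
instance (tree : List (Int × List Int)) (index : Int) : Decidable (Pre_do_prefix_path tree index) := by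
  unfold Pre_do_prefix_path; infer_instance

def pvWitness_do_prefix_path : (List (Int × List Int)) × Int := ([(1, [2, 3]), (2, []), (3, [2])], 1)

def Spec_do_prefix_path (tree : List (Int × List Int)) (index : Int) (out : List Int) : Prop := out = do_prefix_path_alt tree index
instance (tree : List (Int × List Int)) (index : Int) (out : List Int) : Decidable (Spec_do_prefix_path tree index out) := by unfold Spec_do_prefix_path; infer_instance

-- ===== CLAIM (what is proved, stated in full; the proofs are below) =====
def Claim_equal_do_prefix_path : Prop := ∀ (tree : List (Int × List Int)) (index : Int), Dom_do_prefix_path tree index → Pre_do_prefix_path tree index → Spec_do_prefix_path tree index (do_prefix_path tree index)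

-- ===== LEMMAS AND PROOFS =====

-- A's recursion at positive fuel, as cons + flatMap
theorem pvAcore_succ (tree : List (Int × List Int)) (htree : tree ≠ []) (f : Nat) (n : Int) :
    pvAcore tree (f + 1) n
      = n :: (pvChildren tree n).flatMap (fun c => pvAcore tree f c ++ [n]) := by
  have hlen : ¬ tree.length = 0 := by simpa [List.length_eq_zero_iff] using htree
  rw [pvAcore, if_neg hlen]
  unfold pvChildren
  cases h : (PySem.Dict.mk tree).get? n with
  | none => simp
  | some cs =>
      simp only [Option.getD_some, List.append_assoc]
      rw [PySem.List.foldl_append_eq_flatMap]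
      simp

-- the stack machine, run on one frame with exact fuel, produces A's flatMap and pops the frame
theorem pvRun_spec (tree : List (Int × List Int)) (htree : tree ≠ []) :
    ∀ (f : Nat) (cs : List Int) (n : Int) (stk : List (Int × List Int)) (path : List Int) (g : Nat),
      (∀ c ∈ cs, pvHasWalk tree f c = false) →
      pvRun tree (pvNeeded tree f cs + g) ((n, cs) :: stk) path
        = pvRun tree g stk ((path ++ cs.flatMap (fun c => pvAcore tree f c ++ [n])) ++ pvHeadApp stk) := by
  intro f
  induction f with
  | zero =>
      intro cs n stk path g h
      cases cs with
      | nil =>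
          simp only [pvNeeded]
          have h1 : 1 + g = g + 1 := by omega
          rw [h1]; simp [pvRun]
      | cons c cs' =>
          exfalso
          have := h c (by simp)
          simp [pvHasWalk] at this
  | succ f IH =>
      intro cs
      induction cs with
      | nil =>
          intro n stk path g h
          simp only [pvNeeded, List.map_nil, List.sum_nil, Nat.zero_add]
          have h1 : 1 + g = g + 1 := by omega
          rw [h1]; simp [pvRun]
      | cons c cs' IHcs =>
          intro n stk path g h
          have hc : pvHasWalk tree (f + 1) c = false := h c (by simp)
          have hch : ∀ c' ∈ pvChildren tree c, pvHasWalk tree f c' = false := by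
            intro c' hc'
            have := hc
            simp [pvHasWalk, List.any_eq_false] at this
            exact this c' hc'
          have hfuel : pvNeeded tree (f + 1) (c :: cs') + g
              = (pvNeeded tree f (pvChildren tree c) + (pvNeeded tree (f + 1) cs' + g)) + 1 := by
            simp [pvNeeded]; omega
          rw [hfuel]
          show pvRun tree ((pvNeeded tree f (pvChildren tree c) + (pvNeeded tree (f + 1) cs' + g)) + 1)
              ((n, c :: cs') :: stk) path = _
          rw [pvRun]
          rw [IH (pvChildren tree c) c ((n, cs') :: stk) (path ++ [c])
            (pvNeeded tree (f + 1) cs' + g) hch]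
          rw [IHcs n stk _ g (fun x hx => h x (by simp [hx]))]
          rw [List.flatMap_cons, pvAcore_succ tree htree f c]
          simp [pvHeadApp, List.append_assoc]

-- ===== VERDICT (by name: the statement is the Claim_ definition above) =====
theorem do_prefix_path_spec : Claim_equal_do_prefix_path := by
  intro tree index _ hpre
  unfold Spec_do_prefix_path do_prefix_path do_prefix_path_alt
  by_cases htree : tree = []
  · subst htree; simp [pvAcore]
  · have hlen : ¬ tree.length = 0 := by simpa [List.length_eq_zero_iff] using htree
    rw [if_neg hlen]
    have hcs : ∀ c ∈ pvChildren tree index, pvHasWalk tree tree.length c = false := by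
      unfold Pre_do_prefix_path at hpre
      simp [pvHasWalk, List.any_eq_false] at hpre
      exact hpre
    have := pvRun_spec tree htree tree.length (pvChildren tree index) index [] [index] 0 hcs
    rw [pvAcore_succ tree htree]
    simp only [Nat.add_zero] at this
    rw [this]
    simp [pvRun, pvHeadApp]
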